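-- pv_equiv track=rewrite | github.com/mo9mo9-uwu-mo9mo9/Kumihan-Formatter | kumihan_formatter/parsers/list_parser_old.py | detect_list_type
-- ===== SOURCE A (Python) =====
-- from typing import Any, Dict, List, Optional, TYPE_CHECKING, Tuple, Union
--
-- def detect_list_type(line: str) -> Optional[str]:
--     """リストタイプを検出"""
--     stripped = line.strip()
--     if not stripped:
--         return None
--
--     # インデントを除去した実際のコンテンツ部分
--     content_start = len(line) - len(line.lstrip())
--     actual_content = line[content_start:]
--
--     # 順序なしリスト
--     if (
--         actual_content.startswith("- ")
--         or actual_content.startswith("* ")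
--         or actual_content.startswith("+ ")
--     ):
--         return "unordered"
--
--     # 順序ありリスト
--     if len(actual_content) > 1 and actual_content[0].isdigit():
--         for i, char in enumerate(actual_content[1:], 1):
--             if char == ".":
--                 if i < len(actual_content) - 1 and actual_content[i + 1] == " ":
--                     return "ordered"
--                 break
--             elif not char.isdigit():
--                 break
--
--     return None
-- ===== SOURCE B (Python) =====
-- def detect_list_type(line):
--     """リストタイプを検出 — single-pass character state machine."""
--     state = "indent"
--     for ch in line:
--         if state == "indent":
--             if ch.isspace():
--                 continue
--             if ch in "-*+":
--                 state = "bullet"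
--             elif ch.isdigit():
--                 state = "digits"
--             else:
--                 return None
--         elif state == "bullet":
--             return "unordered" if ch == " " else None
--         elif state == "digits":
--             if ch.isdigit():
--                 continue
--             if ch == ".":
--                 state = "dot"
--             else:
--                 return None
--         else:  # after the dot
--             return "ordered" if ch == " " else None
--     return None
-- ===== Notes on version B (the rewrite author's own statement) =====
-- stated objective: alternative
-- what changed: Replaces A's staged string operations (strip/lstrip, three startswith tests, then an enumerate loop with lookahead indexing) by one left-to-right pass over the characters driven by an explicit four-state machine (indent/bullet/digits/dot) with no slicing, lookahead or re-scanning.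
import Mathlib
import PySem

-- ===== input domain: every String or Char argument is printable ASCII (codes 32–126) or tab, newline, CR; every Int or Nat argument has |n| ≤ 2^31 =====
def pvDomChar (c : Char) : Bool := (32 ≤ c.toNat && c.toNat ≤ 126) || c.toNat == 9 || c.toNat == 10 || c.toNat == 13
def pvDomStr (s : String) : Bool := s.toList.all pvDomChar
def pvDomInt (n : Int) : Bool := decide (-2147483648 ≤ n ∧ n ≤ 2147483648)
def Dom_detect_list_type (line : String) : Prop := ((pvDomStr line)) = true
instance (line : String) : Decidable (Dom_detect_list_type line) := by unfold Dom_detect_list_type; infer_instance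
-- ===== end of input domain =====

-- B replaces A's staged string operations (strip/lstrip, startswith tests, an enumerate loop
-- with lookahead) by a single left-to-right pass driven by an explicit four-state machine;
-- objective: alternative (same O(n) cost, different algorithmic structure).


-- ===== PORT A =====
-- the 'for i, char in enumerate(actual_content[1:], 1)' loop of A, with its break/return structure
def pvALoop (actual : List Char) : List (Int × Char) → Option String
  | [] => none
  | (i, c) :: rest =>
    if c = '.' then
      if i < (actual.length : Int) - 1 ∧ PySem.List.pyGetD actual (i + 1) ' ' = ' ' then
        some "ordered"
      else none
    else if PySem.Chars.isdigit c = false then none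
    else pvALoop actual rest

def detect_list_type (line : String) : Option String :=
  let stripped := PySem.Str.strip line
  if stripped.toList = [] then none
  else
    let contentStart : Int := (line.toList.length : Int) - ((PySem.Str.lstrip line).toList.length : Int)
    let actual := PySem.List.slice line.toList (some contentStart) none
    if PySem.Chars.startswith actual ("- ".toList) = true
        ∨ PySem.Chars.startswith actual ("* ".toList) = true
        ∨ PySem.Chars.startswith actual ("+ ".toList) = true then some "unordered"
    else if 1 < actual.length ∧ PySem.Chars.isdigit (PySem.List.pyGetD actual 0 ' ') = true then
      pvALoop actual (PySem.List.enumerate (PySem.List.slice actual (some 1) none) 1)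
    else none

-- ===== PORT B =====
-- B's state variable ("indent" / "bullet" / "digits" / "dot")
inductive PvState : Type
  | indent | bullet | digits | dot
deriving DecidableEq, Repr

-- B's 'for ch in line' loop: one step per character, state carried across iterations
def pvFSM : List Char → PvState → Option String
  | [], _ => none
  | c :: rest, PvState.indent =>
      if PySem.Chars.isspace c = true then pvFSM rest PvState.indent
      else if c ∈ ['-', '*', '+'] then pvFSM rest PvState.bullet
      else if PySem.Chars.isdigit c = true then pvFSM rest PvState.digits
      else none
  | c :: _, PvState.bullet => if c = ' ' then some "unordered" else none
  | c :: rest, PvState.digits =>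
      if PySem.Chars.isdigit c = true then pvFSM rest PvState.digits
      else if c = '.' then pvFSM rest PvState.dot
      else none
  | c :: _, PvState.dot => if c = ' ' then some "ordered" else none

def detect_list_type_alt (line : String) : Option String :=
  pvFSM line.toList PvState.indent

-- ===== PRECONDITION & SPEC =====
def Spec_detect_list_type (line : String) (out : Option String) : Prop := out = detect_list_type_alt line
instance (line : String) (out : Option String) : Decidable (Spec_detect_list_type line out) := by unfold Spec_detect_list_type; infer_instance

-- ===== CLAIM (what is proved, stated in full; the proofs are below) =====
def Claim_equal_detect_list_type : Prop := ∀ (line : String), Dom_detect_list_type line → Spec_detect_list_type line (detect_list_type line)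

-- ===== LEMMAS AND PROOFS =====

-- common characterisation of both ports, on the lstripped content S
def pvSpecFn (S : List Char) : Option String :=
  if S.take 2 ∈ [['-', ' '], ['*', ' '], ['+', ' ']] then some "unordered"
  else if S.takeWhile PySem.Chars.isdigit ≠ [] ∧
      (S.dropWhile PySem.Chars.isdigit).take 2 = ['.', ' '] then some "ordered"
  else none

-- stripping both sides gives [] iff stripping the left side does
theorem pv_strip_empty_iff (l : List Char) :
    PySem.Chars.strip l = [] ↔ PySem.Chars.lstrip l = [] := by
  simp only [PySem.Chars.strip, PySem.Chars.rstrip, PySem.Chars.lstrip]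
  constructor
  · intro h
    by_contra hne
    have hall : ∀ x ∈ (l.dropWhile PySem.Chars.isspace).reverse, PySem.Chars.isspace x := by
      rw [← List.dropWhile_eq_nil_iff]
      simpa using h
    have hhead := List.head_dropWhile_not (p := PySem.Chars.isspace) (l := l) hne
    have hm : (l.dropWhile PySem.Chars.isspace).head hne ∈ (l.dropWhile PySem.Chars.isspace).reverse := by
      simp [List.head_mem]
    rw [hall _ hm] at hhead
    simp at hhead
  · intro h; simp [h]

-- A's line[content_start:] is exactly lstrip
theorem pv_drop_lstrip (l : List Char) :
    l.drop (l.length - (PySem.Chars.lstrip l).length) = PySem.Chars.lstrip l := by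
  simp only [PySem.Chars.lstrip]
  have h2 : (l.takeWhile PySem.Chars.isspace).length + (l.dropWhile PySem.Chars.isspace).length = l.length := by
    rw [← List.length_append, List.takeWhile_append_dropWhile]
  rw [show l.length - (l.dropWhile PySem.Chars.isspace).length = (l.takeWhile PySem.Chars.isspace).length from by omega]
  have key : ∀ (t d : List Char), l = t ++ d → l.drop t.length = d := by
    intro t d h
    rw [h, List.drop_left]
  exact key _ _ (List.takeWhile_append_dropWhile (p := PySem.Chars.isspace) (l := l)).symm

-- a 2-char prefix test is a take-2 comparison
theorem pv_prefix2 (s : List Char) (a b : Char) :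
    ([a, b] <+: s) ↔ s.take 2 = [a, b] := by
  rw [List.prefix_iff_eq_take]
  constructor <;> intro h
  · exact h.symm
  · exact h.symm

-- characterisation of A's scan loop
theorem pvALoop_spec (s : List Char) (tl : List Char) (i : Nat) (h : s.drop i = tl) :
    pvALoop s (PySem.List.enumerate tl (i : Int)) =
      (if (tl.dropWhile PySem.Chars.isdigit).take 2 = ['.', ' '] then some "ordered" else none) := by
  induction tl generalizing i with
  | nil => simp [PySem.List.enumerate_nil, pvALoop]
  | cons c tl' ih =>
    rw [PySem.List.enumerate_cons]
    have hi : i < s.length := by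
      by_contra hx
      rw [List.drop_eq_nil_of_le (by omega)] at h
      simp at h
    have hslen : s.length = i + 1 + tl'.length := by
      have hl := congrArg List.length h
      simp [List.length_drop] at hl
      omega
    have hdrop1 : s.drop (i + 1) = tl' := by
      have hd := congrArg (List.drop 1) h
      rw [List.drop_drop] at hd
      simpa using hd
    by_cases hc : c = '.'
    · subst hc
      rw [List.dropWhile_cons_of_neg (by simp [show PySem.Chars.isdigit '.' = false from rfl])]
      cases tl' with
      | nil =>
        rw [if_neg (by simp)]
        simp only [pvALoop, PySem.List.enumerate_nil]
        rw [if_pos trivial, if_neg]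
        rintro ⟨h1, _⟩
        rw [hslen] at h1
        push_cast [List.length_nil] at h1
        omega
      | cons h2 t2 =>
        have hget : PySem.List.pyGetD s ((i : Int) + 1) ' ' = h2 := by
          rw [show ((i : Int) + 1) = ((i + 1 : Nat) : Int) from by push_cast; ring,
            PySem.List.pyGetD_natCast]
          have hsome : s[i+1]? = some h2 := by
            rw [← List.getElem?_drop, h]
            simp
          simp [List.getD, hsome]
        have hc1 : (i : Int) < (s.length : Int) - 1 := by
          have hs2 : s.length = i + 2 + t2.length := by
            have := hslen; simp at this; omega
          rw [hs2]; push_cast; omega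
        simp only [pvALoop, hget]
        rw [if_pos trivial]
        by_cases hsp : h2 = ' '
        · subst hsp
          rw [if_pos ⟨hc1, rfl⟩, if_pos (by simp)]
        · rw [if_neg (fun hcon => hsp hcon.2), if_neg (by simp [hsp])]
    · simp only [pvALoop, if_neg hc]
      by_cases hd : PySem.Chars.isdigit c = false
      · rw [if_pos hd, List.dropWhile_cons_of_neg (by simp [hd]), if_neg (by
          intro hcon
          rw [show (2 : Nat) = 1 + 1 from rfl, List.take_succ_cons, List.cons.injEq] at hcon
          exact hc hcon.1)]
      · rw [if_neg hd, List.dropWhile_cons_of_pos (by simpa using hd),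
          show ((i : Int) + 1) = ((i + 1 : Nat) : Int) from by push_cast; ring]
        exact ih (i + 1) hdrop1

-- A equals the common characterisation on the lstripped content
theorem pv_A_eq_spec (line : String) :
    detect_list_type line = pvSpecFn (PySem.Chars.lstrip line.toList) := by
  unfold detect_list_type
  simp only [PySem.Str.toList_strip, PySem.Str.toList_lstrip]
  by_cases hemp : PySem.Chars.lstrip line.toList = []
  · rw [if_pos ((pv_strip_empty_iff line.toList).mpr hemp), hemp]
    simp [pvSpecFn]
  · rw [if_neg (fun hx => hemp ((pv_strip_empty_iff line.toList).mp hx))]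
    have hlen_le : (PySem.Chars.lstrip line.toList).length ≤ line.toList.length := by
      simp only [PySem.Chars.lstrip]
      exact List.length_dropWhile_le _ _
    have hactual : PySem.List.slice line.toList
        (some ((line.toList.length : Int) - ((PySem.Chars.lstrip line.toList).length : Int))) none
        = PySem.Chars.lstrip line.toList := by
      rw [PySem.List.slice_from _ (by omega)]
      rw [show ((line.toList.length : Int) - ((PySem.Chars.lstrip line.toList).length : Int)).toNat
          = line.toList.length - (PySem.Chars.lstrip line.toList).length from by omega]
      exact pv_drop_lstrip line.toList
    rw [hactual]
    set S := PySem.Chars.lstrip line.toList with hS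
    have hsw : ∀ (a b : Char), (PySem.Chars.startswith S [a, b] = true) ↔ S.take 2 = [a, b] :=
      fun a b => (PySem.Chars.startswith_iff _ _).trans (pv_prefix2 S a b)
    unfold pvSpecFn
    by_cases hun : S.take 2 = ['-', ' '] ∨ S.take 2 = ['*', ' '] ∨ S.take 2 = ['+', ' ']
    · rw [if_pos, if_pos (by simpa [List.mem_cons] using hun)]
      rcases hun with h | h | h
      · exact Or.inl ((hsw '-' ' ').mpr h)
      · exact Or.inr (Or.inl ((hsw '*' ' ').mpr h))
      · exact Or.inr (Or.inr ((hsw '+' ' ').mpr h))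
    · have hswneg : ¬(PySem.Chars.startswith S ("- ".toList) = true
          ∨ PySem.Chars.startswith S ("* ".toList) = true
          ∨ PySem.Chars.startswith S ("+ ".toList) = true) := by
        rintro (h | h | h)
        · exact hun (Or.inl ((hsw '-' ' ').mp h))
        · exact hun (Or.inr (Or.inl ((hsw '*' ' ').mp h)))
        · exact hun (Or.inr (Or.inr ((hsw '+' ' ').mp h)))
      have hmemneg : S.take 2 ∉ ([['-', ' '], ['*', ' '], ['+', ' ']] : List (List Char)) := by
        intro hx
        exact hun (by simpa [List.mem_cons] using hx)
      rw [if_neg hswneg, if_neg hmemneg]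
      obtain ⟨c, rest, hsx⟩ := List.exists_cons_of_ne_nil hemp
      have hget0 : PySem.List.pyGetD S 0 ' ' = c := by
        rw [hsx]
        exact PySem.List.pyGetD_zero_cons c rest ' '
      rw [hget0]
      by_cases hdig : PySem.Chars.isdigit c = true
      · have hT : S.takeWhile PySem.Chars.isdigit = c :: rest.takeWhile PySem.Chars.isdigit := by
          rw [hsx, List.takeWhile_cons_of_pos hdig]
        have hD : S.dropWhile PySem.Chars.isdigit = rest.dropWhile PySem.Chars.isdigit := by
          rw [hsx, List.dropWhile_cons_of_pos hdig]
        cases rest with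
        | nil =>
          rw [if_neg (by
            rintro ⟨h1, _⟩
            rw [hsx] at h1
            simp at h1)]
          rw [if_neg (by
            rintro ⟨_, h2⟩
            rw [hD] at h2
            simp at h2)]
        | cons r1 r2 =>
          have hlen2 : 1 < S.length := by rw [hsx]; simp
          rw [if_pos ⟨hlen2, hdig⟩]
          have hs1 : PySem.List.slice S (some 1) = S.drop 1 := by
            rw [PySem.List.slice_from _ (by omega)]
            rfl
          rw [hs1, show S.drop 1 = r1 :: r2 from by rw [hsx]; rfl]
          rw [show (1 : Int) = ((1 : Nat) : Int) from rfl]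
          rw [pvALoop_spec S (r1 :: r2) 1 (by rw [hsx]; rfl)]
          rw [← hD]
          by_cases hcond : (S.dropWhile PySem.Chars.isdigit).take 2 = ['.', ' ']
          · rw [if_pos hcond, if_pos ⟨by rw [hT]; simp, hcond⟩]
          · rw [if_neg hcond, if_neg (fun hx => hcond hx.2)]
      · rw [if_neg (fun hx => hdig hx.2)]
        rw [if_neg (by
          rintro ⟨h1, _⟩
          apply h1
          rw [hsx, List.takeWhile_cons_of_neg (by simpa using hdig)])]

-- B's loop in the indent state skips exactly the leading whitespace
theorem pv_fsm_indent (l : List Char) :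
    pvFSM l PvState.indent = pvFSM (l.dropWhile PySem.Chars.isspace) PvState.indent := by
  induction l with
  | nil => rfl
  | cons c rest ih =>
    by_cases hsp : PySem.Chars.isspace c = true
    · rw [List.dropWhile_cons_of_pos hsp]
      simp only [pvFSM, if_pos hsp]
      exact ih
    · rw [List.dropWhile_cons_of_neg hsp]

-- B's loop in the digits state accepts exactly a digit run followed by ". "
theorem pv_fsm_digits (l : List Char) :
    pvFSM l PvState.digits =
      (if (l.dropWhile PySem.Chars.isdigit).take 2 = ['.', ' '] then some "ordered" else none) := by
  induction l with
  | nil => simp [pvFSM]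
  | cons c rest ih =>
    by_cases hd : PySem.Chars.isdigit c = true
    · rw [List.dropWhile_cons_of_pos hd]
      simp only [pvFSM, if_pos hd]
      exact ih
    · rw [List.dropWhile_cons_of_neg hd]
      simp only [pvFSM, if_neg hd]
      by_cases hc : c = '.'
      · subst hc
        rw [if_pos rfl]
        cases rest with
        | nil => simp [pvFSM]
        | cons r1 r2 =>
          simp only [pvFSM]
          by_cases hsp : r1 = ' '
          · subst hsp; rw [if_pos rfl, if_pos (by simp)]
          · rw [if_neg hsp, if_neg (by simp [hsp])]
      · rw [if_neg hc, if_neg (by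
          intro hcon
          rw [show (2 : Nat) = 1 + 1 from rfl, List.take_succ_cons, List.cons.injEq] at hcon
          exact hc hcon.1)]

-- B's loop in the bullet state accepts exactly a following space
theorem pv_fsm_bullet (l : List Char) :
    pvFSM l PvState.bullet = (if l.take 1 = [' '] then some "unordered" else none) := by
  cases l with
  | nil => simp [pvFSM]
  | cons c rest =>
    simp only [pvFSM, List.take_succ_cons, List.take_zero]
    by_cases hsp : c = ' '
    · subst hsp; rw [if_pos rfl, if_pos rfl]
    · rw [if_neg hsp, if_neg (by simp [hsp])]

-- bullet characters are not digits
theorem pv_bullet_not_digit (c : Char) (h : c = '-' ∨ c = '*' ∨ c = '+') :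
    PySem.Chars.isdigit c = false := by
  rcases h with h | h | h <;> subst h <;> decide

-- the head surviving dropWhile fails the predicate
theorem pv_dropWhile_head_false {p : Char → Bool} (l : List Char) (c : Char) (rest : List Char)
    (h : l.dropWhile p = c :: rest) : p c = false := by
  induction l with
  | nil => simp at h
  | cons a t ih =>
    by_cases hp : p a = true
    · rw [List.dropWhile_cons_of_pos hp] at h
      exact ih h
    · rw [List.dropWhile_cons_of_neg hp] at h
      injection h with h1 h2
      subst h1
      simpa using hp

-- B equals the common characterisation on the lstripped content
theorem pv_B_eq_spec (line : String) :
    detect_list_type_alt line = pvSpecFn (PySem.Chars.lstrip line.toList) := by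
  unfold detect_list_type_alt
  rw [pv_fsm_indent]
  have hS : PySem.Chars.lstrip line.toList = line.toList.dropWhile PySem.Chars.isspace := rfl
  rw [← hS]
  cases hsx : PySem.Chars.lstrip line.toList with
  | nil => simp [pvFSM, pvSpecFn]
  | cons c rest =>
    have hcns : PySem.Chars.isspace c = false := by
      exact pv_dropWhile_head_false line.toList c rest (by rw [← hS]; exact hsx)
    simp only [pvFSM, if_neg (by simp [hcns] : ¬ PySem.Chars.isspace c = true)]
    unfold pvSpecFn
    have htake2 : (c :: rest).take 2 = c :: rest.take 1 := by
      rw [show (2 : Nat) = 1 + 1 from rfl, List.take_succ_cons]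
    by_cases hb : c ∈ ['-', '*', '+']
    · rw [if_pos hb, pv_fsm_bullet]
      have hmem : ((c :: rest).take 2 ∈ [['-', ' '], ['*', ' '], ['+', ' ']]) ↔ rest.take 1 = [' '] := by
        rw [htake2]
        constructor
        · intro hx
          have hx' : c :: rest.take 1 = ['-', ' '] ∨ c :: rest.take 1 = ['*', ' ']
              ∨ c :: rest.take 1 = ['+', ' '] := by simpa [List.mem_cons] using hx
          rcases hx' with h | h | h <;> simp_all [List.mem_cons]
        · intro hx
          rcases (by simpa [List.mem_cons] using hb : c = '-' ∨ c = '*' ∨ c = '+') with h | h | h <;>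
            subst h <;> simp [List.mem_cons, hx]
      by_cases hu : rest.take 1 = [' ']
      · rw [if_pos hu, if_pos (hmem.mpr hu)]
      · rw [if_neg hu, if_neg (fun hx => hu (hmem.mp hx)), if_neg (by
          rintro ⟨h1, _⟩
          apply h1
          rw [List.takeWhile_cons_of_neg
            (by simp [pv_bullet_not_digit c (by simpa [List.mem_cons] using hb)])])]
    · rw [if_neg hb]
      have hnmem : ((c :: rest).take 2 ∈ [['-', ' '], ['*', ' '], ['+', ' ']]) → False := by
        intro hx
        rw [htake2] at hx
        have hx' : c :: rest.take 1 = ['-', ' '] ∨ c :: rest.take 1 = ['*', ' ']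
            ∨ c :: rest.take 1 = ['+', ' '] := by simpa [List.mem_cons] using hx
        apply hb
        rcases hx' with h | h | h <;> simp_all [List.mem_cons]
      rw [if_neg hnmem]
      by_cases hd : PySem.Chars.isdigit c = true
      · rw [if_pos hd, pv_fsm_digits]
        rw [List.dropWhile_cons_of_pos hd]
        by_cases hcond : (rest.dropWhile PySem.Chars.isdigit).take 2 = ['.', ' ']
        · rw [if_pos hcond, if_pos ⟨by rw [List.takeWhile_cons_of_pos hd]; simp, hcond⟩]
        · rw [if_neg hcond, if_neg (fun hx => hcond hx.2)]
      · rw [if_neg hd, if_neg (by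
          rintro ⟨h1, _⟩
          apply h1
          rw [List.takeWhile_cons_of_neg (by simpa using hd)])]

-- ===== VERDICT (by name: the statement is the Claim_ definition above) =====
theorem detect_list_type_spec : Claim_equal_detect_list_type := by
  intro line _hdom
  unfold Spec_detect_list_type
  rw [pv_A_eq_spec, pv_B_eq_spec]
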